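-- pv_equiv track=rewrite | github.com/Cyrus-Majd/random_math | fractals/hilbert_curve.py | hilbert_curve
-- ===== SOURCE A (Python) =====
-- def hilbert_curve(order, angle, depth):
--     if depth == 0:
--         return []
--
--     angle *= -1
--     sub_curve = hilbert_curve(order, angle, depth - 1)
--
--     return (
--         sub_curve
--         + [angle]
--         + sub_curve
--         + [angle]
--         + [0]
--         + sub_curve
--         + [-angle]
--         + [0]
--         + [angle]
--         + sub_curve
--         + [0]
--         + [-angle]
--         + sub_curve
--     )
-- ===== SOURCE B (Python) =====
-- def hilbert_curve(order, angle, depth):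
--     # Iterative bottom-up construction: the innermost level uses angle*(-1)**depth,
--     # and each level up flips the sign of the angle.
--     cur = []
--     a = angle if depth % 2 == 0 else -angle
--     for _ in range(depth):
--         cur = (cur + [a] + cur + [a] + [0] + cur
--                + [-a] + [0] + [a] + cur + [0] + [-a] + cur)
--         a = -a
--     return cur
-- ===== Notes on version B (the rewrite author's own statement) =====
-- stated objective: alternative
-- what changed: Replaces the top-down recursion by an iterative bottom-up loop: start from the empty list with the innermost angle sign (angle*(-1)**depth) and splice the accumulated curve into the L-system template depth times, flipping the angle sign each pass.
import Mathlib
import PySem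

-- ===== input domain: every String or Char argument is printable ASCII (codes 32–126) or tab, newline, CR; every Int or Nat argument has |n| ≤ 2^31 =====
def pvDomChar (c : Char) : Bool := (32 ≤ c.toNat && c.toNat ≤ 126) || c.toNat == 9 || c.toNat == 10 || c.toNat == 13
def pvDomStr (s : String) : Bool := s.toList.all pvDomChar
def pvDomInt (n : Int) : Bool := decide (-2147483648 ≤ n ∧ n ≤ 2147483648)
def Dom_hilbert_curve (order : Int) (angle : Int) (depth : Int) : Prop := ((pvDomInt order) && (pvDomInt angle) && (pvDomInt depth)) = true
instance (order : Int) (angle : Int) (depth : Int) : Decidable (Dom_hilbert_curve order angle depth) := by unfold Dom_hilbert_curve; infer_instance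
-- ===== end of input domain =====

-- B is the same L-system built iteratively bottom-up instead of by top-down recursion. RETURN-value equivalence on depth ≥ 0 (A never returns on depth < 0).

-- ===== PORT A =====
-- A's recursion, on fuel depth.toNat (A diverges for depth < 0; Pre_ excludes that).
def hilbertA (angle : Int) : Nat → List Int
  | 0 => []
  | n + 1 =>
      let a := -angle
      let s := hilbertA a n
      s ++ [a] ++ s ++ [a] ++ [0] ++ s ++ [-a] ++ [0] ++ [a] ++ s ++ [0] ++ [-a] ++ s

def hilbert_curve (order : Int) (angle : Int) (depth : Int) : List Int :=
  hilbertA angle depth.toNat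

-- ===== PORT B =====
-- one iteration of B's loop body
def hilbertStep (cur : List Int) (a : Int) : List Int :=
  cur ++ [a] ++ cur ++ [a] ++ [0] ++ cur ++ [-a] ++ [0] ++ [a] ++ cur ++ [0] ++ [-a] ++ cur

def hilbertB (cur : List Int) (a : Int) : Nat → List Int
  | 0 => cur
  | n + 1 => hilbertB (hilbertStep cur a) (-a) n

def hilbert_curve_alt (order : Int) (angle : Int) (depth : Int) : List Int :=
  hilbertB [] (if PySem.Int.mod depth 2 = 0 then angle else -angle) depth.toNat

-- ===== PRECONDITION & SPEC =====
-- Pre_ excludes depth < 0, where Python's A recurses without a base case (RecursionError, no value).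
def Pre_hilbert_curve (order : Int) (angle : Int) (depth : Int) : Prop := 0 ≤ depth
instance (order : Int) (angle : Int) (depth : Int) : Decidable (Pre_hilbert_curve order angle depth) := by unfold Pre_hilbert_curve; infer_instance

def pvWitness_hilbert_curve : Int × Int × Int := (2, 90, 2)

def Spec_hilbert_curve (order : Int) (angle : Int) (depth : Int) (out : List Int) : Prop := out = hilbert_curve_alt order angle depth
instance (order : Int) (angle : Int) (depth : Int) (out : List Int) : Decidable (Spec_hilbert_curve order angle depth out) := by unfold Spec_hilbert_curve; infer_instance

-- ===== CLAIM (what is proved, stated in full; the proofs are below) =====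
def Claim_equal_hilbert_curve : Prop := ∀ (order : Int) (angle : Int) (depth : Int), Dom_hilbert_curve order angle depth → Pre_hilbert_curve order angle depth → Spec_hilbert_curve order angle depth (hilbert_curve order angle depth)


-- ===== LEMMAS AND PROOFS =====

-- B's loop peels its LAST iteration: running n+1 steps is one hilbertStep applied on top of n steps, with the flipped angle b*(-1)^n.
theorem hilbertB_succ (n : Nat) : ∀ (cur : List Int) (b : Int),
    hilbertB cur b (n + 1) = hilbertStep (hilbertB cur b n) (b * (-1) ^ n) := by
  induction n with
  | zero => intro cur b; simp [hilbertB, hilbertStep]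
  | succ n ih =>
      intro cur b
      calc hilbertB cur b (n + 1 + 1)
            = hilbertB (hilbertStep cur b) (-b) (n + 1) := by simp only [hilbertB]
        _ = hilbertStep (hilbertB (hilbertStep cur b) (-b) n) (-b * (-1) ^ n) := ih _ _
        _ = hilbertStep (hilbertB cur b (n + 1)) (b * (-1) ^ (n + 1)) := by
              have : hilbertB cur b (n + 1) = hilbertB (hilbertStep cur b) (-b) n := by
                simp only [hilbertB]
              rw [this]; congr 1; ring

-- From the empty list, n iterations of B equal A's recursion with incoming angle b*(-1)^n.
theorem hilbertB_eq_hilbertA (n : Nat) : ∀ (b : Int),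
    hilbertB [] b n = hilbertA (b * (-1) ^ n) n := by
  induction n with
  | zero => intro b; rfl
  | succ n ih =>
      intro b
      rw [hilbertB_succ, ih]
      show _ = hilbertA (b * (-1) ^ (n + 1)) (n + 1)
      have ha : -(b * (-1) ^ (n + 1)) = b * (-1) ^ n := by ring
      simp only [hilbertA, ha]
      rfl

-- ===== VERDICT (by name: the statement is the Claim_ definition above) =====
theorem hilbert_curve_spec : Claim_equal_hilbert_curve := by
  intro order angle depth _ hpre
  have hpre' : 0 ≤ depth := hpre
  show hilbert_curve order angle depth = hilbert_curve_alt order angle depth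
  unfold hilbert_curve hilbert_curve_alt
  rw [hilbertB_eq_hilbertA]
  congr 1
  have h2 : PySem.Int.mod depth 2 = depth % 2 := PySem.Int.mod_eq_emod_of_pos (by norm_num)
  rcases Nat.even_or_odd depth.toNat with he | ho
  · have he' := Nat.even_iff.mp he
    have hmod : PySem.Int.mod depth 2 = 0 := by rw [h2]; omega
    rw [if_pos hmod, he.neg_one_pow, mul_one]
  · have ho' := Nat.odd_iff.mp ho
    have hmod : PySem.Int.mod depth 2 ≠ 0 := by rw [h2]; omega
    rw [if_neg hmod, ho.neg_one_pow]; ring
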